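/-
  SEGMENT C13 OF `start_decoder` (THE TYPE-1 EXPANSION: loop 3910 `for (j=0; j < len; ++j)` around loop 3913
  `for (k=0; k < c->dimensions; ++k)`, then `c->lookup_type = 2`; stb_vorbis_fixed.c:3910–3931, 0x114f0f … 0x1150b4), SPLIT IN FOUR at the
  head of the inner loop (`Vorbis.L.start_decoder.loop12`, 0x114f32) and at two check calls of its body
  (`Vorbis.L.start_decoder.chk122`, 0x114f78: the load of `mults[off]`; `Vorbis.L.start_decoder.chk126`, 0x114fe7: the load of
  `c->sequence_p`).

      StartDecoder.At13J n d j           the entry `AtC13` with its counter `j` and the two loop bounds `n = N(c)`, `d = dimensions` named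
      StartDecoder.In13K / At13K         the assertion inside the inner loop at a program counter `pc`: the clauses of `InC13` but `r13`
                                         + `j < N` + `r15d = k ≤ D` + `ebx = div ∈ [1, 2^32)` + the spilled `sparse` + `N = n`, `D = d`
      StartDecoder.At13K22 / At13K26     `At13K` at chk122 / chk126 + `k < D` + the argument register of the check call
      StartDecoder.C13.carry13           THE CARRY of `In13K` over check calls and the float / `z` locals (`C13.QuietWin13`); `C13.out13`
                                         (the same to `InC13` at the outer head), both from `C13.core13`
      StartDecoder.SegC13a               0x115057 → `AtC15` (`j ≥ len`: `lookup_type = 2` stored) ∨ 0x114f32 with `k = 0` (`z`, `div = 1`)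
      StartDecoder.SegC13b               0x114f32 → 0x115057 with `j + 1` (`D ≤ k`) ∨ 0x114f78 (`off = (z / div) % LV`, two `div`)
      StartDecoder.SegC13c               0x114f78 → 0x114fe7 (`val`, SSE; the checked store `multiplicands[j·D + k] = val`)
      StartDecoder.SegC13d               0x114fe7 → 0x114f32 with `k + 1` (`last`; `div *= LV` after `mul ; jo`) ∨ ERR (the overflow stub
                                         0x115027: setup_temp_free + error)
      StartDecoder.SegC13.of_parts       SegC13a → SegC13b → SegC13c → SegC13d → SegC13   (the claim `SegC13` of StartDecoderA.lean is unchanged)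

  THE TWO LOOP BOUNDS ARE GHOSTS OF THE CLAIMS (`n`, `d`): every assertion says `N(c) = n` and `dimensions = d` (fields of the struct,
  which no instruction of the segment but 0x1150af writes), so that the measures `n − j`, `d − k` of the composition do not speak of a
  state. Registers inside the inner loop (callee-saved only): `r14 = c` (`Cur.r14`), `r12d = j`, `r15d = k`, `ebx = div`; `r13d` is
  `dimensions` from 0x114f3a to 0x114fbb and dead elsewhere (`sparse` lives in `d[R+4CH]` and is reloaded at 0x11504e); `rbp`, the
  `xmm` registers are dead at the three cut points. Stack slots: `d[R+24H] = 0` (Z24), `q[R+28H] = mults`, `d[R+44H] = len`,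
  `d[R+48H] = z` (ANY value: `off = (z / div) % LV < LV` whatever `z` is), `d[R+38H]`, `d[R+40H]` (float bits: no constraint).
-/
import Vorbis.LabelsAt
import Vorbis.Spec.StartDecoderA
import Vorbis.Spec.StartDecoderCarry
namespace Vorbis.Spec.StartDecoder
open X86 X86.User Asan

/-- **`At13J n d j`, 0x115057** (`loop13` = `pc_C13`; entry of `C13a`, back-edge exit of `C13b`): `AtC13` with the counter `j` of
`InC13` exposed and the two loop bounds named: `n = N(c)` (`len` of line 3909), `d = c->dimensions`. -/
def At13J (u₀ : State) (g : Ghost) (i : Nat) (n d : Int) (j : Nat) (v : State) : Prop :=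
  ∃ (A : Arena × List Obj) (mults : Nat) (A2 A3 Ai Am : Arena),
    InC13 u₀ g i A2 A3 Ai Am A mults j v ∧
    Codebook.N v.mem (g.cb v.mem i) = n ∧ Codebook.dimensions v.mem (g.cb v.mem i) = d

/-- `AtC13` is `At13J` for its own counter and the bounds read from its state. -/
theorem At13J.of_atC13 {u₀ : State} {g : Ghost} {i : Nat} {v : State} (h : AtC13 u₀ g i v) :
    ∃ j, At13J u₀ g i (Codebook.N v.mem (g.cb v.mem i)) (Codebook.dimensions v.mem (g.cb v.mem i)) j v := by
  obtain ⟨A, mults, j, A2, A3, Ai, Am, hi⟩ := h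
  exact ⟨j, A, mults, A2, A3, Ai, Am, hi, rfl, rfl⟩

/-- **THE INVARIANT OF THE INNER LOOP 3913** at a program counter `pc` (`loop12`, `chk122`, `chk126`): the clauses of `InC13` but
`r13` (inside the inner loop `r13d` is `dimensions` or dead; `sparse` is in the slot `d[R+4CH]`), with `j < N` (the `jge` of 0x11505e
was not taken), the inner counter `r15d = kk ≤ D`, `ebx = div` with `1 ≤ div < 2^32` (the divisor of 0x114f4f; `div *= LV` only
after `mul ebx ; jo` did not overflow), and the two bounds `N = n`, `D = d`. Nothing is asserted of `d[R+48H]` (z), `d[R+38H]`,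
`d[R+40H]` (float bits), `rbp`, `r13`, the `xmm` registers, or of the floats already stored into `multiplicands`. -/
structure In13K (u₀ : State) (g : Ghost) (i : Nat) (A2 A3 Ai Am : Arena) (A : Arena × List Obj) (mults : Nat) (n d : Int)
    (j kk : Nat) (pc : Word) (v : State) : Prop where
  frame : Frame u₀ g pc A v
  cur : Cur g i A2 A3 Ai A v
  /-- `Am` lies between the head of the iteration and now -/
  extm : Ai.Extends Am
  extm' : Am.Extends A.1
  k : K15 (Since Ai Am) v.mem (g.cb v.mem i)
  type1 : Codebook.lookup_type v.mem (g.cb v.mem i) = 1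
  r12 : v.reg .r12 = addr j
  /-- `cmp r12d, eax ; jge` of 0x11505b not taken -/
  j_lt : (j : Int) < Codebook.N v.mem (g.cb v.mem i)
  /-- len of line 3909 -/
  slot_len : v.mem.i32 (g.R + 0x44) = Codebook.N v.mem (g.cb v.mem i)
  prod_le : Codebook.N v.mem (g.cb v.mem i) * Codebook.dimensions v.mem (g.cb v.mem i) ≤ 0x1FFFFFFF
  mu : Since Am A.1 ⟨Codebook.multiplicands v.mem (g.cb v.mem i),
    4 * ((Codebook.N v.mem (g.cb v.mem i)).toNat * (Codebook.dimensions v.mem (g.cb v.mem i)).toNat)⟩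
  mults : Mults g A v.mem (g.cb v.mem i) mults
  /-- the inner counter (`mov r15d, [rsp+24H]` = 0 at 0x115092, `add r15d, 1` at 0x114fff: the whole register) -/
  r15 : v.reg .r15 = addr kk
  k_le : (kk : Int) ≤ Codebook.dimensions v.mem (g.cb v.mem i)
  /-- `div` of line 3912 (`mov ebx, 1` at 0x115097, `imul ebx, ecx` at 0x114f23 after `mul ebx ; jo` not taken) -/
  div : ∃ dv, v.reg .rbx = addr dv ∧ 1 ≤ dv ∧ dv < 2 ^ 32
  /-- `sparse`, spilled at 0x11509c and reloaded into `r13d` at 0x11504e for `InC13.r13` of the next outer round -/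
  slot_sp : v.mem.u32 (g.R + 0x4c) = Codebook.sparse v.mem (g.cb v.mem i)
  n_eq : Codebook.N v.mem (g.cb v.mem i) = n
  d_eq : Codebook.dimensions v.mem (g.cb v.mem i) = d

/-- **`At13K n d j k pc`**: `In13K` at `pc` for some ghost arena, `mults` block and ghost snapshots. At `pc = loop12` (0x114f32) it is
the assertion at the head of loop 3913: exit of `C13a` (`k = 0`) and of `C13d` (`k + 1`), entry of `C13b`. -/
def At13K (u₀ : State) (g : Ghost) (i : Nat) (n d : Int) (j kk : Nat) (pc : Word) (v : State) : Prop :=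
  ∃ (A : Arena × List Obj) (mults : Nat) (A2 A3 Ai Am : Arena), In13K u₀ g i A2 A3 Ai Am A mults n d j kk pc v

/-- **`At13K22 n d j k`, 0x114f78** (`chk122`: `call __asan_load2_noabort` with `rdi = &mults[off]`; exit of `C13b`, entry of `C13c`):
`In13K` + `k < D` (the `jle` of 0x114f40 was not taken) + `r13d = D` (loaded at 0x114f3a, read at 0x114fbb) + the argument:
`rdi = rbp = mults + 2·off` for some `off < LV` (`off` = the remainder of the second `div`; the load after the check goes through
`rbp`). -/
def At13K22 (u₀ : State) (g : Ghost) (i : Nat) (n d : Int) (j kk : Nat) (v : State) : Prop :=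
  ∃ (A : Arena × List Obj) (mults : Nat) (A2 A3 Ai Am : Arena),
    In13K u₀ g i A2 A3 Ai Am A mults n d j kk L.start_decoder.chk122 v ∧
    (kk : Int) < d ∧
    v.reg .r13 = addr d.toNat ∧
    ∃ off, off < Codebook.lookup_values v.mem (g.cb v.mem i) ∧ v.reg .rdi = addr (mults + 2 * off) ∧
      v.reg .rbp = v.reg .rdi

/-- **`At13K26 n d j k`, 0x114fe7** (`chk126`: `call __asan_load1_noabort` with `rdi = &c->sequence_p`; exit of `C13c`, entry of
`C13d`): `In13K` for the memory after the store `multiplicands[j·D + k] = val` + `k < D` + the argument `rdi = c + 1AH`. `r13` is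
dead from here on (0x115003 compares with `[r14]`). -/
def At13K26 (u₀ : State) (g : Ghost) (i : Nat) (n d : Int) (j kk : Nat) (v : State) : Prop :=
  ∃ (A : Arena × List Obj) (mults : Nat) (A2 A3 Ai Am : Arena),
    In13K u₀ g i A2 A3 Ai Am A mults n d j kk L.start_decoder.chk126 v ∧
    (kk : Int) < d ∧
    v.reg .rdi = addr (g.cb v.mem i + 0x1a)

namespace C13

/-- **A window a step of the inner loop may write without touching anything `In13K` reads**: the stack below the steady `R` (the
return address of a check call, the check routine's frame), the two float locals `d[R+38H]`, `d[R+40H]` (and the unused dword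
between them), the slot `d[R+48H]` of `z`. (The store into `multiplicands` is not such a window: `Cur.store_young`,
`K15.store_later`.) -/
def QuietWin13 (g : Ghost) (w : Span) : Prop :=
  (g.R - 408 ≤ w.lo ∧ w.hi ≤ g.R) ∨ (g.R + 0x38 ≤ w.lo ∧ w.hi ≤ g.R + 0x44) ∨ (g.R + 0x48 ≤ w.lo ∧ w.hi ≤ g.R + 0x4c)

set_option maxHeartbeats 1000000 in
/-- **The memory side of the carry** (what `carry13` and `out13` share): over a stretch that writes only quiet windows, `Frame` and
`Cur` at the new state, `cb(i)` unmoved, K1 – K5, every field of the struct, `N(c)`, and the three stack slots `In13K` reads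
(`q[R+28H]`, `d[R+44H]`, `d[R+4CH]`). -/
theorem core13 {u₀ : State} {g : Ghost} {i : Nat} {A2 A3 Ai Am : Arena} {A : Arena × List Obj} {mults : Nat} {n d : Int}
    {j kk : Nat} {pc pc' : Word} {v w : State} {ws : List Span}
    (h : In13K u₀ g i A2 A3 Ai Am A mults n d j kk pc v)
    (hs : Mem.SameExcept ws v.mem w.mem) (hun : ShadowUntouched v.mem w.mem) (hq : ∀ x, x ∈ ws → QuietWin13 g x)
    (hrip : w.rip = pc') (hrsp : w.reg .rsp = v.reg .rsp) (hcode : CodeOK u₀ w.mem) (hinv : abiInv w)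
    (hr14 : w.reg .r14 = v.reg .r14) :
    Frame u₀ g pc' A w ∧ Cur g i A2 A3 Ai A w ∧ g.cb w.mem i = g.cb v.mem i ∧
      K15 (Since Ai Am) w.mem (g.cb v.mem i) ∧ Codebook.SameFields v.mem w.mem (g.cb v.mem i) ∧
      Codebook.N w.mem (g.cb v.mem i) = Codebook.N v.mem (g.cb v.mem i) ∧
      w.mem.u64 (g.R + 0x28) = v.mem.u64 (g.R + 0x28) ∧ w.mem.i32 (g.R + 0x44) = v.mem.i32 (g.R + 0x44) ∧
      w.mem.u32 (g.R + 0x4c) = v.mem.u32 (g.R + 0x4c) := by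
  have hfr := h.frame
  have hpos : Pos g A := Pos.of hfr h.cur
  have hm0 : MInv g i A2 A3 Ai A v.mem := MInv.of hfr h.cur
  have hcw := hm0.c_where
  have p1 := hpos.r_eq
  have p2 := hpos.ra_lo
  have p3 := hpos.ra_hi
  have hq0 : ∀ x, x ∈ ws → OkWin0 g (g.cb v.mem i) x := by
    intro x hx
    have k := hq x hx
    unfold QuietWin13 at k
    unfold OkWin0
    omega
  have hq1 : ∀ x, x ∈ ws → OkWin0 g (g.cb v.mem i + 2120) x := by
    intro x hx
    have k := hq x hx
    unfold QuietWin13 at k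
    unfold OkWin0
    omega
  have hb : Bits (g.Blk A) g.len w.mem g.f := by
    apply bits_kept hpos hm0.sd.bits hs
    intro x hx
    have k := hq x hx
    unfold QuietWin13 at k
    omega
  have hF := Frame.step hfr h.cur hs hun (fun x hx => (hq0 x hx).ok) hb hrip hrsp hcode hinv
  obtain ⟨hC, hcb⟩ := Cur.step hfr h.cur hs hun (fun x hx => (hq0 x hx).ok) hb hr14
  -- the struct `cb(i)` and the `sorted_values` block
  have hstruct : (Codebook.block (g.cb v.mem i)).Kept v.mem w.mem := by
    apply blk_kept0 (c := g.cb v.mem i + 2120) hpos hs hq1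
    · simp only [vblock, voff]
      omega
    · simp only [vblock, voff]
      omega
  have hsf := Codebook.SameFields.of_kept hstruct
  have hsv : 1 ≤ Codebook.sorted_entries v.mem (g.cb v.mem i) →
      (Codebook.svBlock v.mem (g.cb v.mem i)).Kept v.mem w.mem := by
    intro hse
    exact young_kept0 hm0 hpos hs hq0 ((h.k.k4.sv hse).mono h.extm')
  have hk : K15 (Since Ai Am) w.mem (g.cb v.mem i) := h.k.frame hstruct hsv
  have eN : Codebook.N w.mem (g.cb v.mem i) = Codebook.N v.mem (g.cb v.mem i) := by
    unfold Codebook.N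
    rw [hsf.sparse, hsf.entries, hsf.sorted_entries]
  -- the three stack slots the invariant reads
  have hst : Mem.EqOn (g.R + 0x28) (g.R + 0x30) v.mem w.mem := by
    apply hs.eqOn
    intro x hx
    have k := hq x hx
    unfold QuietWin13 at k
    omega
  have hst44 : Mem.EqOn (g.R + 0x44) (g.R + 0x48) v.mem w.mem := by
    apply hs.eqOn
    intro x hx
    have k := hq x hx
    unfold QuietWin13 at k
    omega
  have hst4c : Mem.EqOn (g.R + 0x4c) (g.R + 0x50) v.mem w.mem := by
    apply hs.eqOn
    intro x hx
    have k := hq x hx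
    unfold QuietWin13 at k
    omega
  exact ⟨hF, hC, hcb, hk, hsf, eN, hst.u64 (g.R + 0x28) (Nat.le_refl _) (by omega) (by omega),
    hst44.i32 (g.R + 0x44) (Nat.le_refl _) (by omega) (by omega), hst4c.u32 (g.R + 0x4c) (Nat.le_refl _) (by omega) (by omega)⟩

/-- **THE CARRY OF THE INNER LOOP'S INVARIANT** over a stretch that writes only quiet windows (`QuietWin13`: check calls, the float
locals, `z`): `In13K` at the new state and program counter, same ghost arena, for the NEW counters `j'`, `kk'` and divisor the
registers hold there (bounds stated for the OLD state's `N`, `dimensions`: the struct is kept).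
WHEN: the end of every walk of `C13b`, `C13c` (before / after the store into `multiplicands`), `C13d` that made no contract call.
HOW: `hs` = the walker's memory fact as a `Mem.SameExcept` (`Mem.SameExcept.writeLE` per push / store, `.trans`), `hun` by
`v_untouched`, `hq` per window `unfold C13.QuietWin13; omega`; unchanged registers: `(w_kept.get .r15 rfl).trans h.r15`. -/
theorem carry13 {u₀ : State} {g : Ghost} {i : Nat} {A2 A3 Ai Am : Arena} {A : Arena × List Obj} {mults : Nat} {n d : Int}
    {j kk j' kk' : Nat} {pc pc' : Word} {v w : State} {ws : List Span}
    (h : In13K u₀ g i A2 A3 Ai Am A mults n d j kk pc v)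
    (hs : Mem.SameExcept ws v.mem w.mem) (hun : ShadowUntouched v.mem w.mem) (hq : ∀ x, x ∈ ws → QuietWin13 g x)
    (hrip : w.rip = pc') (hrsp : w.reg .rsp = v.reg .rsp) (hcode : CodeOK u₀ w.mem) (hinv : abiInv w)
    (hr14 : w.reg .r14 = v.reg .r14) (hr12 : w.reg .r12 = addr j') (hj : (j' : Int) < Codebook.N v.mem (g.cb v.mem i))
    (hr15 : w.reg .r15 = addr kk') (hk : (kk' : Int) ≤ Codebook.dimensions v.mem (g.cb v.mem i))
    (hdiv : ∃ dv, w.reg .rbx = addr dv ∧ 1 ≤ dv ∧ dv < 2 ^ 32) :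
    In13K u₀ g i A2 A3 Ai Am A mults n d j' kk' pc' w := by
  obtain ⟨hF, hC, hcb, hk15, hsf, eN, e28, e44, e4c⟩ := core13 h hs hun hq hrip hrsp hcode hinv hr14
  exact
    { frame := hF
      cur := hC
      extm := h.extm
      extm' := h.extm'
      k := by rw [hcb]; exact hk15
      type1 := by rw [hcb, hsf.lookup_type]; exact h.type1
      r12 := hr12
      j_lt := by rw [hcb, eN]; exact hj
      slot_len := by rw [hcb, eN, e44]; exact h.slot_len
      prod_le := by rw [hcb, eN, hsf.dimensions]; exact h.prod_le
      mu := by rw [hcb, eN, hsf.dimensions, hsf.multiplicands]; exact h.mu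
      mults :=
        { slot := by rw [e28]; exact h.mults.slot
          temps := by rw [hcb, hsf.lookup_values]; exact h.mults.temps
          lv_pos := by rw [hcb, hsf.lookup_values]; exact h.mults.lv_pos
          lv_lt := by rw [hcb, hsf.lookup_values]; exact h.mults.lv_lt }
      r15 := hr15
      k_le := by rw [hcb, hsf.dimensions]; exact hk
      div := hdiv
      slot_sp := by rw [hcb, hsf.sparse, e4c]; exact h.slot_sp
      n_eq := by rw [hcb, eN]; exact h.n_eq
      d_eq := by rw [hcb, hsf.dimensions]; exact h.d_eq }

/-- **Back to the outer head** (the exit `jle 0x11504e` of `C13b`): over a stretch that writes only quiet windows, `InC13` at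
`pc_C13` for the next counter `j'` (`r12d`, `j' ≤ N`) with `r13 = sparse` reloaded from its slot, and the two bounds unchanged. -/
theorem out13 {u₀ : State} {g : Ghost} {i : Nat} {A2 A3 Ai Am : Arena} {A : Arena × List Obj} {mults : Nat} {n d : Int}
    {j kk j' : Nat} {pc : Word} {v w : State} {ws : List Span}
    (h : In13K u₀ g i A2 A3 Ai Am A mults n d j kk pc v)
    (hs : Mem.SameExcept ws v.mem w.mem) (hun : ShadowUntouched v.mem w.mem) (hq : ∀ x, x ∈ ws → QuietWin13 g x)
    (hrip : w.rip = pc_C13) (hrsp : w.reg .rsp = v.reg .rsp) (hcode : CodeOK u₀ w.mem) (hinv : abiInv w)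
    (hr14 : w.reg .r14 = v.reg .r14) (hr12 : w.reg .r12 = addr j') (hj : (j' : Int) ≤ Codebook.N v.mem (g.cb v.mem i))
    (hr13 : w.reg .r13 = addr (Codebook.sparse v.mem (g.cb v.mem i))) :
    InC13 u₀ g i A2 A3 Ai Am A mults j' w ∧ Codebook.N w.mem (g.cb w.mem i) = n ∧
      Codebook.dimensions w.mem (g.cb w.mem i) = d := by
  obtain ⟨hF, hC, hcb, hk15, hsf, eN, e28, e44, e4c⟩ := core13 h hs hun hq hrip hrsp hcode hinv hr14
  refine ⟨?_, by rw [hcb, eN]; exact h.n_eq, by rw [hcb, hsf.dimensions]; exact h.d_eq⟩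
  exact
    { frame := hF
      cur := hC
      extm := h.extm
      extm' := h.extm'
      k := by rw [hcb]; exact hk15
      type1 := by rw [hcb, hsf.lookup_type]; exact h.type1
      r12 := hr12
      j_le := by rw [hcb, eN]; exact hj
      r13 := by rw [hcb, hsf.sparse]; exact hr13
      slot_len := by rw [hcb, eN, e44]; exact h.slot_len
      prod_le := by rw [hcb, eN, hsf.dimensions]; exact h.prod_le
      mu := by rw [hcb, eN, hsf.dimensions, hsf.multiplicands]; exact h.mu
      mults :=
        { slot := by rw [e28]; exact h.mults.slot
          temps := by rw [hcb, hsf.lookup_values]; exact h.mults.temps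
          lv_pos := by rw [hcb, hsf.lookup_values]; exact h.mults.lv_pos
          lv_lt := by rw [hcb, hsf.lookup_values]; exact h.mults.lv_lt } }

end C13

/-- **Segment `start_decoder.C13a`** (the head of the outer loop, 0x115057 … 0x1150a1 with the dense arm 0x114f0f … 0x114f14, and the
exit 0x1150a6 … 0x1150b4; 24 instructions: `j ≥ len` → the checked store `c->lookup_type = 2`, `jmp 0x114dfa`: `AtC15`; otherwise
`z = sparse ? c->sorted_values[j] : j` into `d[R+48H]` (checks 0x115070, 0x115086), `k = 0`, `div = 1`, the spill of `sparse`, the jump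
to the inner head): from the outer head to `AtC15` or to the inner head with `k = 0`. No contract call. -/
def SegC13a (Lay : Layout) (μ : Microarch) (u₀ : State) : Prop :=
  ∀ (g : Ghost) (i : Nat) (n d : Int) (j : Nat) (v : State), At13J u₀ g i n d j v →
    ReachVia Lay μ WayInv v (fun w => AtC15 u₀ g i w ∨ At13K u₀ g i n d j 0 L.start_decoder.loop12 w)

/-- **Segment `start_decoder.C13b`** (the head of the inner loop, 0x114f32 … 0x114f75 with the exit 0x11504e … 0x115053; 21
instructions: the test `k < c->dimensions` (check 0x114f35); `D ≤ k` → `r13d = sparse` from its slot, `++j`: the outer head;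
otherwise `off = (z / div) % LV` (`div ebx`, check 0x114f57, `div DWORD PTR [r14+1CH]`) and `rdi = rbp = &mults[off]`): from the inner
head to the outer head with `j + 1`, or to the check call 0x114f78. No contract call. -/
def SegC13b (Lay : Layout) (μ : Microarch) (u₀ : State) : Prop :=
  ∀ (g : Ghost) (i : Nat) (n d : Int) (j kk : Nat) (v : State), At13K u₀ g i n d j kk L.start_decoder.loop12 v →
    ReachVia Lay μ WayInv v (fun w => At13J u₀ g i n d (j + 1) w ∨ At13K22 u₀ g i n d j kk w)

/-- **Segment `start_decoder.C13c`** (0x114f78 … 0x114fe3, 25 instructions: `val = mults[off]·delta_value + minimum_value + last`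
(checks 0x114f78, 0x114f85, 0x114fa0; SSE), the checked store `multiplicands[j·D + k] = val` (0x114fd3; `InC13.store_mu`'s two
halves `Cur.store_young`, `K15.store_later`), `rdi = &c->sequence_p`): from the first check call of the body to the last. No
contract call. -/
def SegC13c (Lay : Layout) (μ : Microarch) (u₀ : State) : Prop :=
  ∀ (g : Ghost) (i : Nat) (n d : Int) (j kk : Nat) (v : State), At13K22 u₀ g i n d j kk v →
    ReachVia Lay μ WayInv v (fun w => At13K26 u₀ g i n d j kk w)

/-- **Segment `start_decoder.C13d`** (0x114fe7 … 0x115021 with the back edge 0x114f19 … 0x114f2c and the overflow stub 0x115027 …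
0x115049; 29 instructions: `if (c->sequence_p) last = val`, `++k`; `k + 1 < D` → `mul ebx ; jo`: overflow →
`setup_temp_free(f, mults, 2·LV)`, `error(f, 20)`, `jmp 0x113b22`; otherwise `div *= LV`; `last` into `d[R+40H]`): from the last check
call of the body to the inner head with `k + 1`, or to the error exit. -/
def SegC13d (Lay : Layout) (μ : Microarch) (u₀ : State) : Prop :=
  ∀ (g : Ghost) (i : Nat) (n d : Int) (j kk : Nat) (v : State), At13K26 u₀ g i n d j kk v →
    ReachVia Lay μ WayInv v (fun w => At13K u₀ g i n d j (kk + 1) L.start_decoder.loop12 w ∨ AtERR u₀ g w)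

/-- **Segment C13 from its four parts**: the inner loop by induction on `d − k` (C13b's exit to the body states `k < d`), the outer
loop by induction on `n − j` (C13a's exit to the inner head states `j < n`: `In13K.j_lt`, `In13K.n_eq`). -/
theorem SegC13.of_parts {Lay : Layout} {μ : Microarch} {u₀ : State} (ha : SegC13a Lay μ u₀) (hb : SegC13b Lay μ u₀)
    (hc : SegC13c Lay μ u₀) (hd : SegC13d Lay μ u₀) : SegC13 Lay μ u₀ := by
  intro g i v hat
  -- the inner loop: from its head with any `k` to the outer head with `j + 1`, or to the error exit
  have hin : ∀ (n d : Int) (j m kk : Nat) (s : State), At13K u₀ g i n d j kk L.start_decoder.loop12 s → (d - kk).toNat ≤ m →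
      ReachVia Lay μ WayInv s (fun w => At13J u₀ g i n d (j + 1) w ∨ AtERR u₀ g w) := by
    intro n d j m
    induction m with
    | zero =>
      intro kk s hs hm
      refine (hb g i n d j kk s hs).trans ?_
      intro w hw
      rcases hw with hj | h22
      · exact ReachVia.done (Or.inl hj)
      · obtain ⟨_, _, _, _, _, _, _, hlt, _⟩ := h22
        omega
    | succ m ih =>
      intro kk s hs hm
      refine (hb g i n d j kk s hs).trans ?_
      intro w hw
      rcases hw with hj | h22
      · exact ReachVia.done (Or.inl hj)
      · have hlt : (kk : Int) < d := by
          obtain ⟨_, _, _, _, _, _, _, hlt, _⟩ := h22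
          exact hlt
        refine (hc g i n d j kk w h22).trans ?_
        intro w2 h26
        refine (hd g i n d j kk w2 h26).trans ?_
        intro w3 h3
        rcases h3 with hk | he
        · exact ih (kk + 1) w3 hk (by omega)
        · exact ReachVia.done (Or.inr he)
  -- the outer loop: from its head with any `j` to `AtC15` or the error exit
  have hout : ∀ (n d : Int) (m j : Nat) (s : State), At13J u₀ g i n d j s → (n - j).toNat ≤ m →
      ReachVia Lay μ WayInv s (fun w => AtC15 u₀ g i w ∨ AtERR u₀ g w) := by
    intro n d m
    induction m with
    | zero =>
      intro j s hs hm
      refine (ha g i n d j s hs).trans ?_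
      intro w hw
      rcases hw with h15 | hk
      · exact ReachVia.done (Or.inl h15)
      · obtain ⟨_, _, _, _, _, _, hk'⟩ := hk
        have hlt := hk'.j_lt
        rw [hk'.n_eq] at hlt
        omega
    | succ m ih =>
      intro j s hs hm
      refine (ha g i n d j s hs).trans ?_
      intro w hw
      rcases hw with h15 | hk
      · exact ReachVia.done (Or.inl h15)
      · have hlt : (j : Int) < n := by
          obtain ⟨_, _, _, _, _, _, hk'⟩ := hk
          have hlt := hk'.j_lt
          rw [hk'.n_eq] at hlt
          exact hlt
        refine (hin n d j _ 0 w hk (Nat.le_refl _)).trans ?_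
        intro w2 h2
        rcases h2 with hj | he
        · exact ih (j + 1) w2 hj (by omega)
        · exact ReachVia.done (Or.inr he)
  obtain ⟨j, hj⟩ := At13J.of_atC13 hat
  exact hout _ _ _ j v hj (Nat.le_refl _)

end Vorbis.Spec.StartDecoder
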